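-- pv_equiv track=rewrite | github.com/kjnh10/pcw | work/atcoder/abc/abc023/B/answers/112138_Gale.py | solve
-- ===== SOURCE A (Python) =====
-- def solve(n, s):
--     prev = 'b'
--     if s == 'b':
--         return 0
--     first = "bac"
--     last = "bca"
--     for i in range(1, n // 2 + 1):
--         prev = first[i % 3] + prev + last[i % 3]
--         if s == prev:
--             return i
--     return -1
-- ===== SOURCE B (Python) =====
-- def solve(n, s):
--     if s == 'b':
--         return 0
--     L = len(s)
--     if L % 2 == 0:
--         return -1
--     i = L // 2
--     if i < 1 or i > n // 2:
--         return -1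
--     if s[i] != 'b':
--         return -1
--     first = "bac"
--     last = "bca"
--     for j in range(1, i + 1):
--         if s[i - j] != first[j % 3] or s[i + j] != last[j % 3]:
--             return -1
--     return i
-- ===== Notes on version B (the rewrite author's own statement) =====
-- stated objective: faster
-- what changed: Instead of rebuilding the growing string for every i up to n//2 and comparing, B computes the only possible answer i=(len(s)-1)//2 from the length and verifies s character-by-character against the pattern in one O(len(s)) pass.
import Mathlib
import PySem

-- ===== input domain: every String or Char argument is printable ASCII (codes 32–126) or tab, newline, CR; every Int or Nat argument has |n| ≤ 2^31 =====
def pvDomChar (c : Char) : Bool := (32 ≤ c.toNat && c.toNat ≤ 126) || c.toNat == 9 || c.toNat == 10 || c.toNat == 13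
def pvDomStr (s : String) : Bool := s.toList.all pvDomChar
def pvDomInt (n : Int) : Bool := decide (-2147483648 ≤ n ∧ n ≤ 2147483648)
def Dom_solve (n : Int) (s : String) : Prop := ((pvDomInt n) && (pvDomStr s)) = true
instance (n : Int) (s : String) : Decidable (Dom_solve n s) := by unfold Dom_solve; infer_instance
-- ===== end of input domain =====

-- B replaces A's loop that rebuilds the candidate string for every i ≤ n//2 by a direct
-- verification of the single length-determined candidate i = (len s - 1)/2 (objective: faster).

-- first[k % 3] and last[k % 3] of the Python sources (index k % 3 is always in range)
def fch (k : Nat) : Char := ['b', 'a', 'c'].getD (k % 3) 'b'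
def gch (k : Nat) : Char := ['b', 'c', 'a'].getD (k % 3) 'b'

-- ===== PORT A =====
-- the for-loop of A: `k` = remaining iterations, `i` = current loop index, `prev` = the string built so far
def solveLoopA (sl : List Char) : Nat → Nat → List Char → Int
  | 0, _, _ => -1
  | k + 1, i, prev =>
    let prev' := fch i :: (prev ++ [gch i])
    if sl = prev' then (i : Int) else solveLoopA sl k (i + 1) prev'

def solve (n : Int) (s : String) : Int :=
  let sl := s.toList
  if sl = ['b'] then 0
  -- range(1, n//2 + 1) performs max(0, n//2) iterations starting at i = 1
  else solveLoopA sl (PySem.Int.floordiv n 2).toNat 1 ['b']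

-- ===== PORT B =====
-- the for-loop of B: `k` = remaining iterations, `j` = current offset from the center `i`
-- (all indices i-j, i+j are in range, so List.getD is exact for Python's s[...])
def solveLoopB (sl : List Char) (i : Nat) : Nat → Nat → Int
  | 0, _ => (i : Int)
  | k + 1, j =>
    if sl.getD (i - j) ' ' ≠ fch j ∨ sl.getD (i + j) ' ' ≠ gch j then -1
    else solveLoopB sl i k (j + 1)

def solve_alt (n : Int) (s : String) : Int :=
  let sl := s.toList
  if sl = ['b'] then 0
  else
    let L := sl.length
    if L % 2 = 0 then -1
    else
      let i := L / 2
      if (i : Int) < 1 ∨ (i : Int) > PySem.Int.floordiv n 2 then -1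
      else if sl.getD i ' ' ≠ 'b' then -1
      else solveLoopB sl i i 1

-- ===== PRECONDITION & SPEC =====
def Spec_solve (n : Int) (s : String) (out : Int) : Prop := out = solve_alt n s
instance (n : Int) (s : String) (out : Int) : Decidable (Spec_solve n s out) := by unfold Spec_solve; infer_instance

-- ===== CLAIM (what is proved, stated in full; the proofs are below) =====
def Claim_equal_solve : Prop := ∀ (n : Int) (s : String), Dom_solve n s → Spec_solve n s (solve n s)

-- ===== LEMMAS AND PROOFS =====

-- the string A has built after i iterations
def pat : Nat → List Char
  | 0 => ['b']
  | i + 1 => fch (i + 1) :: (pat i ++ [gch (i + 1)])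

lemma pat_length (i : Nat) : (pat i).length = 2 * i + 1 := by
  induction i with
  | zero => rfl
  | succ i ih => simp [pat, ih]; omega

lemma pat_succ (i : Nat) (h : 1 ≤ i) : pat i = fch i :: (pat (i - 1) ++ [gch i]) := by
  cases i with
  | zero => omega
  | succ i => simp [pat]

lemma pat_getD_center (i : Nat) : (pat i).getD i ' ' = 'b' := by
  induction i with
  | zero => rfl
  | succ i ih =>
    have h := pat_length i
    simp [pat, List.getD, List.getElem?_append_left (by omega : i < (pat i).length)]
    simpa [List.getD] using ih

lemma pat_getD_left (i j : Nat) (h1 : 1 ≤ j) (h2 : j ≤ i) :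
    (pat i).getD (i - j) ' ' = fch j := by
  induction i with
  | zero => omega
  | succ i ih =>
    by_cases hj : j = i + 1
    · subst hj; simp [pat]
    · have hji : j ≤ i := by omega
      have h := pat_length i
      have : i + 1 - j = (i - j) + 1 := by omega
      rw [pat, this]
      simp only [List.getD, List.getElem?_cons_succ]
      rw [List.getElem?_append_left (by omega : i - j < (pat i).length)]
      exact ih hji

lemma pat_getD_right (i j : Nat) (h1 : 1 ≤ j) (h2 : j ≤ i) :
    (pat i).getD (i + j) ' ' = gch j := by
  induction i with
  | zero => omega
  | succ i ih =>
    have h := pat_length i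
    by_cases hj : j = i + 1
    · subst hj
      have : i + 1 + (i + 1) = ((pat i).length) + 1 := by omega
      have hidx : i + 1 + (i + 1) = (2 * i + 1) + 1 := by omega
      rw [pat, hidx]
      simp only [List.getD, List.getElem?_cons_succ]
      rw [List.getElem?_append_right (by omega : (pat i).length ≤ 2 * i + 1)]
      simp [h]
    · have hji : j ≤ i := by omega
      have : i + 1 + j = (i + j) + 1 := by omega
      rw [pat, this]
      simp only [List.getD, List.getElem?_cons_succ]
      rw [List.getElem?_append_left (by omega : i + j < (pat i).length)]
      exact ih hji

-- sl = pat c is equivalent to B's pointwise checks (given the right length)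
lemma eq_pat_iff (sl : List Char) (c : Nat) (hlen : sl.length = 2 * c + 1) :
    sl = pat c ↔ (sl.getD c ' ' = 'b' ∧
      ∀ j, 1 ≤ j → j ≤ c → sl.getD (c - j) ' ' = fch j ∧ sl.getD (c + j) ' ' = gch j) := by
  constructor
  · rintro rfl
    exact ⟨pat_getD_center c, fun j h1 h2 => ⟨pat_getD_left c j h1 h2, pat_getD_right c j h1 h2⟩⟩
  · rintro ⟨hc, hall⟩
    have hlen' : sl.length = (pat c).length := by rw [hlen, pat_length]
    have key : ∀ idx, idx < sl.length → sl.getD idx ' ' = (pat c).getD idx ' ' := by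
      intro idx hidx
      rcases lt_trichotomy idx c with h | h | h
      · have e : c - (c - idx) = idx := by omega
        rw [← e, (hall (c - idx) (by omega) (by omega)).1,
          pat_getD_left c (c - idx) (by omega) (by omega)]
      · subst h; rw [hc, pat_getD_center]
      · have e : c + (idx - c) = idx := by omega
        rw [← e, (hall (idx - c) (by omega) (by omega)).2,
          pat_getD_right c (idx - c) (by omega) (by omega)]
    apply List.ext_getElem hlen'
    intro idx h1 h2
    have := key idx h1
    rwa [List.getD_eq_getElem _ _ h1, List.getD_eq_getElem _ _ h2] at this

lemma loopB_spec (sl : List Char) (c : Nat) (hlen : sl.length = 2 * c + 1)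
    (hc : sl.getD c ' ' = 'b') :
    ∀ k j, j + k = c + 1 → 1 ≤ j →
      (∀ j', 1 ≤ j' → j' < j → sl.getD (c - j') ' ' = fch j' ∧ sl.getD (c + j') ' ' = gch j') →
      solveLoopB sl c k j = if sl = pat c then (c : Int) else -1 := by
  intro k
  induction k with
  | zero =>
    intro j hjk hj1 hpre
    have hp : sl = pat c :=
      (eq_pat_iff sl c hlen).2 ⟨hc, fun j' h1' h2' => hpre j' h1' (by omega)⟩
    rw [solveLoopB, if_pos hp]
  | succ k ih =>
    intro j hjk hj1 hpre
    have hjc : j ≤ c := by omega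
    rw [solveLoopB]
    by_cases hchk : sl.getD (c - j) ' ' ≠ fch j ∨ sl.getD (c + j) ' ' ≠ gch j
    · rw [if_pos hchk, if_neg]
      rintro rfl
      rcases hchk with h | h
      · exact h (pat_getD_left c j hj1 hjc)
      · exact h (pat_getD_right c j hj1 hjc)
    · push Not at hchk
      rw [if_neg (by push Not; exact hchk)]
      refine ih (j + 1) (by omega) (by omega) ?_
      intro j' h1' h2'
      by_cases hj' : j' = j
      · subst hj'; exact hchk
      · exact hpre j' h1' (by omega)

lemma loopA_spec (sl : List Char) (c : Nat) (hc : c = sl.length / 2) :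
    ∀ k i0, 1 ≤ i0 →
      solveLoopA sl k i0 (pat (i0 - 1)) =
        if i0 ≤ c ∧ c < i0 + k ∧ sl = pat c then (c : Int) else -1 := by
  intro k
  induction k with
  | zero =>
    intro i0 h1
    rw [solveLoopA, if_neg]
    rintro ⟨ha, hb, _⟩; omega
  | succ k ih =>
    intro i0 h1
    rw [solveLoopA]
    have hp : fch i0 :: (pat (i0 - 1) ++ [gch i0]) = pat i0 := (pat_succ i0 h1).symm
    simp only [hp]
    by_cases heq : sl = pat i0
    · have hlen := congrArg List.length heq
      rw [pat_length] at hlen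
      have hci : c = i0 := by omega
      rw [if_pos heq, if_pos ⟨by omega, by omega, by rw [hci]; exact heq⟩, hci]
    · rw [if_neg heq]
      have : pat i0 = pat (i0 + 1 - 1) := by norm_num
      rw [this, ih (i0 + 1) (by omega)]
      by_cases hpc : sl = pat c
      · have hci : c ≠ i0 := fun h => heq (h ▸ hpc)
        by_cases hb2 : i0 ≤ c ∧ c < i0 + (k + 1)
        · rw [if_pos ⟨by omega, by omega, hpc⟩, if_pos ⟨hb2.1, hb2.2, hpc⟩]
        · rw [if_neg, if_neg]
          · rintro ⟨x, y, _⟩; exact hb2 ⟨x, by omega⟩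
          · rintro ⟨x, y, _⟩; exact hb2 ⟨by omega, by omega⟩
      · rw [if_neg (by rintro ⟨_, _, h⟩; exact hpc h),
            if_neg (by rintro ⟨_, _, h⟩; exact hpc h)]

-- ===== VERDICT (by name: the statement is the Claim_ definition above) =====
theorem solve_spec : Claim_equal_solve := by
  intro n s _
  unfold Spec_solve solve solve_alt
  by_cases hb : s.toList = ['b']
  · rw [if_pos hb, if_pos hb]
  · rw [if_neg hb, if_neg hb]
    have hA := loopA_spec s.toList (s.toList.length / 2) rfl
      (PySem.Int.floordiv n 2).toNat 1 (by omega)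
    rw [show pat (1 - 1) = ['b'] from rfl] at hA
    rw [hA]
    set sl := s.toList with hsl
    set d := PySem.Int.floordiv n 2 with hd
    set c := sl.length / 2 with hcdef
    by_cases heven : sl.length % 2 = 0
    · rw [if_pos heven, if_neg]
      rintro ⟨h1, h2, h3⟩
      have := congrArg List.length h3
      rw [pat_length] at this
      omega
    · rw [if_neg heven]
      by_cases hrange : (c : Int) < 1 ∨ (c : Int) > d
      · rw [if_pos hrange, if_neg]
        rintro ⟨h1, h2, _⟩
        rcases hrange with h | h <;> omega
      · rw [if_neg hrange]
        push Not at hrange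
        obtain ⟨hr1, hr2⟩ := hrange
        have hc1 : 1 ≤ c := by omega
        have hcd : c < 1 + d.toNat := by omega
        by_cases hcen : sl.getD c ' ' = 'b'
        · rw [if_neg (not_not_intro hcen)]
          have hlen : sl.length = 2 * c + 1 := by omega
          rw [loopB_spec sl c hlen hcen c 1 (by omega) (by omega) (by intro j' h1' h2'; omega)]
          by_cases hpc : sl = pat c
          · rw [if_pos ⟨hc1, by omega, hpc⟩, if_pos hpc]
          · rw [if_neg (by rintro ⟨_, _, h⟩; exact hpc h), if_neg hpc]
        · rw [if_pos hcen, if_neg]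
          rintro ⟨_, _, h3⟩
          exact hcen (h3 ▸ pat_getD_center c)
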